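-- pv_equiv track=rewrite | github.com/heeringa/digits | digits.py | generate_lists
-- ===== SOURCE A (Python) =====
-- from typing import Iterable, List, TypeVar, Generator
--
-- def generate_lists(tokens: List[str], N: int) -> List[List[str]]:
--     if N == 0:
--         return [[]]  # Base case: Return a list with an empty list as the only element
--     result = []
--     for token in tokens:
--         # Recursively generate lists of length N-1 using the remaining tokens
--         sublists = generate_lists(tokens, N - 1)
--         # Append the current token to each sublist of length N-1
--         for sublist in sublists:
--             result.append([token] + sublist)
--
--     return result
-- ===== SOURCE B (Python) =====
-- def generate_lists(tokens, N):
--     result = [[]]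
--     for _ in range(N):
--         result = [prefix + [token] for prefix in result for token in tokens]
--     return result
-- ===== Notes on version B (the rewrite author's own statement) =====
-- stated objective: faster
-- what changed: Replaces A's exponential recursion (which recomputes the full (N-1)-product once per token, plus a list prepend per element) with a single iterative loop that extends every prefix once per position.
-- outside the precondition, e.g. on generate_lists([], -1): A returns [], B returns [[]]; on generate_lists(['a'], -1): A raises RecursionError, B returns [[]]
import Mathlib
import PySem

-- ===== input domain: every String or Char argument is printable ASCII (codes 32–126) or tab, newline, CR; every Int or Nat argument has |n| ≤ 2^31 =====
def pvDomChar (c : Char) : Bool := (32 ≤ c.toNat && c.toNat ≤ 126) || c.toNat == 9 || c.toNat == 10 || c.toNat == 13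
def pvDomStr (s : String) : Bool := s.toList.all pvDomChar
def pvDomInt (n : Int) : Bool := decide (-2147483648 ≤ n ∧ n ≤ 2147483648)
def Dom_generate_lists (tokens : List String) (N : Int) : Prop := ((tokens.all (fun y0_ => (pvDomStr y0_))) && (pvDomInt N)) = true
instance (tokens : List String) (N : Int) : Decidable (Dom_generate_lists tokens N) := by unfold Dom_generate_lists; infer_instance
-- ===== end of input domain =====

-- B replaces A's exponential recursion (recomputing the (N-1)-product once per token) with one
-- iterative loop that extends every prefix in place; return values proved equal for N ≥ 0.

-- ===== PORT A =====
-- A's recursion on N, with the Int argument modelled by a Nat counter (A only terminates for N ≥ 0).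
def genRecA (tokens : List String) : Nat → List (List String)
  | 0 => [[]]
  | n + 1 =>
    tokens.foldl
      (fun result token =>
        result ++ (genRecA tokens n).map (fun sublist => token :: sublist)) []

def generate_lists (tokens : List String) (N : Int) : List (List String) :=
  genRecA tokens N.toNat

-- ===== PORT B =====
def generate_lists_alt (tokens : List String) (N : Int) : List (List String) :=
  (List.range N.toNat).foldl
    (fun result _ =>
      result.flatMap (fun pfx => tokens.map (fun token => pfx ++ [token]))) [[]]

-- ===== PRECONDITION & SPEC =====
-- Pre_ excludes negative N: there A's recursion never reaches its base case (RecursionError for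
-- non-empty tokens), and the [] it returns for empty tokens is an accident of the empty loop.
def Pre_generate_lists (tokens : List String) (N : Int) : Prop := 0 ≤ N
instance (tokens : List String) (N : Int) : Decidable (Pre_generate_lists tokens N) := by
  unfold Pre_generate_lists; infer_instance

def pvWitness_generate_lists : List String × Int := (["a", "b"], 2)

def Spec_generate_lists (tokens : List String) (N : Int) (out : List (List String)) : Prop := out = generate_lists_alt tokens N
instance (tokens : List String) (N : Int) (out : List (List String)) : Decidable (Spec_generate_lists tokens N out) := by unfold Spec_generate_lists; infer_instance

-- ===== CLAIM (what is proved, stated in full; the proofs are below) =====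
def Claim_equal_generate_lists : Prop := ∀ (tokens : List String) (N : Int), Dom_generate_lists tokens N → Pre_generate_lists tokens N → Spec_generate_lists tokens N (generate_lists tokens N)

-- ===== LEMMAS AND PROOFS =====

-- One unfolding of A's recursion, rewritten as a flatMap.
theorem genRecA_succ (tokens : List String) (n : Nat) :
    genRecA tokens (n + 1)
      = tokens.flatMap (fun token => (genRecA tokens n).map (fun s => token :: s)) := by
  simp only [genRecA, PySem.List.foldl_append_eq_flatMap, List.nil_append]

-- The crux: prepending a token to every (n)-sequence (A's order) is the same as appending a
-- token to every (n)-sequence built the other way round (B's step).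
-- Prepending over a flatMap-extended list commutes with the extension step
-- (because t :: (p ++ [s]) = (t :: p) ++ [s]).
theorem cons_comm_step (tokens : List String) (L : List (List String)) :
    tokens.flatMap (fun t => (L.flatMap (fun p => tokens.map (fun s => p ++ [s]))).map (fun s => t :: s))
      = (tokens.flatMap (fun t => L.map (fun s => t :: s))).flatMap
          (fun p => tokens.map (fun s => p ++ [s])) := by
  simp only [List.map_flatMap, List.flatMap_map, List.flatMap_assoc, List.map_map,
    Function.comp_def, List.cons_append]

theorem genRecA_snoc (tokens : List String) (n : Nat) :
    genRecA tokens (n + 1)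
      = (genRecA tokens n).flatMap (fun p => tokens.map (fun t => p ++ [t])) := by
  induction n with
  | zero =>
    rw [genRecA_succ]
    induction tokens with
    | nil => rfl
    | cons h t iht =>
      simp only [List.flatMap_cons, genRecA, List.flatMap_nil, List.map_cons, List.map_nil,
        List.nil_append, List.append_nil, List.singleton_append, List.cons.injEq] at iht ⊢
      exact ⟨trivial, iht⟩
  | succ n ih =>
    rw [genRecA_succ (n := n + 1), ih, cons_comm_step, ← genRecA_succ, ih]

theorem genRecA_eq_iter (tokens : List String) (n : Nat) :
    genRecA tokens n
      = (List.range n).foldl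
          (fun result _ =>
            result.flatMap (fun p => tokens.map (fun t => p ++ [t]))) [[]] := by
  induction n with
  | zero => simp [genRecA]
  | succ n ih =>
    rw [genRecA_snoc, ih, List.range_succ, List.foldl_append]
    simp

-- ===== VERDICT (by name: the statement is the Claim_ definition above) =====
theorem generate_lists_spec : Claim_equal_generate_lists := by
  intro tokens N _ _
  unfold Spec_generate_lists generate_lists generate_lists_alt
  exact genRecA_eq_iter tokens N.toNat
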